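-- pv_equiv track=rewrite | github.com/agp8x/astar | draw.py | clear_front
-- ===== SOURCE A (Python) =====
-- def clear_front(front):
--     nodes = {}
--     for candidate in front:
--         position = candidate[0]
--         if position in nodes:
--             if nodes[position][1] > candidate[1]:
--                 nodes[position] = candidate
--         else:
--             nodes[position] = candidate
--     return [nodes[pos] for pos in nodes]
-- ===== SOURCE B (Python) =====
-- def clear_front(front):
--     groups = {}
--     for candidate in front:
--         groups.setdefault(candidate[0], []).append(candidate)
--     return [min(group, key=lambda c: c[1]) for group in groups.values()]
-- ===== Notes on version B (the rewrite author's own statement) =====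
-- stated objective: alternative
-- what changed: Replaces A's single-pass running-minimum dict update with a two-phase group-then-reduce: first pass groups all candidates by position with setdefault, second pass takes min(group, key=cost) per group in insertion order.
import Mathlib
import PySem

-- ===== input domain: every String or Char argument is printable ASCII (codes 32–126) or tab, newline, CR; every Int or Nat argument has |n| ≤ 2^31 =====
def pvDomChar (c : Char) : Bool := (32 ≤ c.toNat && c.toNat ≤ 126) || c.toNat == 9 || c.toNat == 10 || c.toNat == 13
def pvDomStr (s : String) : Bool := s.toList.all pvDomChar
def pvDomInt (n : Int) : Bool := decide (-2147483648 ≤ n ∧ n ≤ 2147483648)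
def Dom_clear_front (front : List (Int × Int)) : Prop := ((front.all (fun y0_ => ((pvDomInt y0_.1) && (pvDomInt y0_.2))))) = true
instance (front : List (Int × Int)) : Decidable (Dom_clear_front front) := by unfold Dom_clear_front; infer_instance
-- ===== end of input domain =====

-- B replaces A's single-pass running-minimum dict with a two-phase group-by-position
-- then min-per-group reduction (alternative decomposition, same asymptotic cost).


-- ===== PORT A =====
-- 'position in nodes' + 'nodes[position]' is ported as one match on get? (some ↔ the key is present).
def clear_front (front : List (Int × Int)) : List (Int × Int) :=
  (front.foldl (fun nodes candidate =>
      match nodes.get? candidate.1 with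
      | some v => if v.2 > candidate.2 then nodes.insert candidate.1 candidate else nodes
      | none => nodes.insert candidate.1 candidate)
    (PySem.Dict.empty : PySem.Dict Int (Int × Int))).values

-- ===== PORT B =====
-- groups.setdefault(c[0], []).append(c)  ==  groups[c[0]] = groups.get(c[0], []) + [c]  ==  Dict.modify;
-- min(group, key=…) is PySem.List.minD; the default (0, 0) is never used (every group is nonempty).
def clear_front_alt (front : List (Int × Int)) : List (Int × Int) :=
  ((front.foldl (fun groups candidate =>
      groups.modify candidate.1 [] (fun g => g ++ [candidate]))
    (PySem.Dict.empty : PySem.Dict Int (List (Int × Int)))).values).map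
    (fun group => PySem.List.minD group (fun c => c.2) (0, 0))

-- ===== PRECONDITION & SPEC =====
def Spec_clear_front (front : List (Int × Int)) (out : List (Int × Int)) : Prop := out = clear_front_alt front
instance (front : List (Int × Int)) (out : List (Int × Int)) : Decidable (Spec_clear_front front out) := by unfold Spec_clear_front; infer_instance

-- ===== CLAIM (what is proved, stated in full; the proofs are below) =====
def Claim_equal_clear_front : Prop := ∀ (front : List (Int × Int)), Dom_clear_front front → Spec_clear_front front (clear_front front)

-- ===== LEMMAS AND PROOFS =====

-- first minimal element by second component (what both min(…, key) and A's strict-> update compute)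
def msnd (g : List (Int × Int)) : Int × Int := PySem.List.minD g (fun c => c.2) (0, 0)

theorem min?_append_one (g : List (Int × Int)) (c m : Int × Int)
    (h : PySem.List.min? g (fun x => x.2) = some m) :
    PySem.List.min? (g ++ [c]) (fun x => x.2) = some (if c.2 < m.2 then c else m) := by
  unfold PySem.List.min? at h ⊢
  rw [List.foldl_append, List.foldl_cons, List.foldl_nil, h]
  split_ifs with hc <;> simp [hc]

theorem msnd_append_one (g : List (Int × Int)) (c : Int × Int) (h : g ≠ []) :
    msnd (g ++ [c]) = if c.2 < (msnd g).2 then c else msnd g := by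
  have hm := PySem.List.min?_eq_some_minD g (fun x => x.2) (0, 0) h
  have h2 := min?_append_one g c _ hm
  simp [msnd, PySem.List.minD, h2]

theorem mem_items_of_get? (d : PySem.Dict Int (List (Int × Int))) (k : Int)
    (v : List (Int × Int)) (h : d.get? k = some v) : (k, v) ∈ d.items := by
  unfold PySem.Dict.get? at h
  cases hf : List.find? (fun p => p.1 == k) d.items with
  | none => simp [hf] at h
  | some p =>
    simp only [hf, Option.map_some, Option.some.injEq] at h
    have hp := List.mem_of_find?_eq_some hf
    have hk : p.1 = k := by simpa using List.find?_some hf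
    have : p = (k, v) := by rw [← hk, ← h]
    rwa [this] at hp

theorem get?_rel (nodes : PySem.Dict Int (Int × Int)) (groups : PySem.Dict Int (List (Int × Int)))
    (h : nodes.items = groups.items.map (fun p => (p.1, msnd p.2))) (k : Int) :
    nodes.get? k = (groups.get? k).map msnd := by
  simp only [PySem.Dict.get?, h, List.find?_map]
  have hpred : ((fun p : Int × (Int × Int) => p.1 == k) ∘ (fun p : Int × List (Int × Int) => (p.1, msnd p.2)))
      = fun p : Int × List (Int × Int) => p.1 == k := rfl
  rw [hpred]
  cases List.find? (fun p : Int × List (Int × Int) => p.1 == k) groups.items <;> simp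

theorem loop_rel (front : List (Int × Int)) :
    ∀ (nodes : PySem.Dict Int (Int × Int)) (groups : PySem.Dict Int (List (Int × Int))),
    nodes.items = groups.items.map (fun p => (p.1, msnd p.2)) →
    (∀ p ∈ groups.items, p.2 ≠ []) →
    groups.keys.Nodup →
    (front.foldl (fun nodes candidate =>
      match nodes.get? candidate.1 with
      | some v => if v.2 > candidate.2 then nodes.insert candidate.1 candidate else nodes
      | none => nodes.insert candidate.1 candidate) nodes).items
    = ((front.foldl (fun groups candidate =>
        groups.modify candidate.1 [] (fun g => g ++ [candidate])) groups).items).map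
        (fun p => (p.1, msnd p.2)) := by
  induction front with
  | nil => intro nodes groups hrel _ _; simpa using hrel
  | cons c front ih =>
    intro nodes groups hrel hne hnodup
    simp only [List.foldl_cons]
    have hget := get?_rel nodes groups hrel c.1
    cases hq : groups.get? c.1 with
    | none =>
      -- new key: both sides append
      have hcg : groups.contains c.1 = false := (PySem.Dict.get?_eq_none_iff_contains groups c.1).mp hq
      have hcn : nodes.contains c.1 = false := by
        apply (PySem.Dict.get?_eq_none_iff_contains nodes c.1).mp
        rw [hget, hq]; rfl
      rw [hq] at hget
      simp only [Option.map_none] at hget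
      simp only [hget]
      have hmod : groups.modify c.1 [] (fun g => g ++ [c]) = groups.insert c.1 [c] := by
        simp [PySem.Dict.modify, PySem.Dict.getD, hq]
      rw [hmod]
      apply ih
      · rw [PySem.Dict.items_insert_of_not_contains _ _ hcn,
            PySem.Dict.items_insert_of_not_contains _ _ hcg, List.map_append, hrel]
        rfl
      · intro p hp
        rw [PySem.Dict.items_insert_of_not_contains _ _ hcg] at hp
        rcases List.mem_append.mp hp with h1 | h1
        · exact hne p h1
        · simp at h1; simp [h1]
      · exact PySem.Dict.nodup_keys_insert _ _ _ hnodup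
    | some old =>
      have hmem : (c.1, old) ∈ groups.items := mem_items_of_get? groups c.1 old hq
      have hold : old ≠ [] := hne _ hmem
      have hcg : groups.contains c.1 = true := by
        cases hcg : groups.contains c.1
        · rw [(PySem.Dict.get?_eq_none_iff_contains groups c.1).mpr hcg] at hq; exact absurd hq (by simp)
        · rfl
      have hcn : nodes.contains c.1 = true := by
        cases hcn : nodes.contains c.1
        · rw [(PySem.Dict.get?_eq_none_iff_contains nodes c.1).mpr hcn, hq] at hget
          exact absurd hget (by simp)
        · rfl
      rw [hq] at hget
      simp only [hget, Option.map_some]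
      have hmod : groups.modify c.1 [] (fun g => g ++ [c]) = groups.insert c.1 (old ++ [c]) := by
        simp [PySem.Dict.modify, PySem.Dict.getD, hq]
      rw [hmod]
      have hBitems : (groups.insert c.1 (old ++ [c])).items
          = groups.items.map (fun p => if p.1 == c.1 then (c.1, old ++ [c]) else p) :=
        PySem.Dict.items_insert_of_contains _ _ hcg
      have hmapp := msnd_append_one old c hold
      by_cases hgt : (msnd old).2 > c.2
      · -- candidate wins: A inserts
        simp only [if_pos hgt]
        apply ih
        · rw [PySem.Dict.items_insert_of_contains _ _ hcn, hBitems, hrel,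
              List.map_map, List.map_map]
          apply List.map_congr_left
          intro p _
          by_cases hpk : p.1 = c.1
          · simp [Function.comp, hpk, hmapp, show c.2 < (msnd old).2 from hgt]
          · simp [Function.comp, hpk]
        · intro p hp
          rw [hBitems] at hp
          rcases List.mem_map.mp hp with ⟨q, hq', hqe⟩
          by_cases hqk : q.1 = c.1
          · rw [← hqe]; simp [hqk]
          · rw [← hqe]; simpa [hqk] using hne q hq'
        · exact PySem.Dict.nodup_keys_insert _ _ _ hnodup
      · -- stored value wins: A keeps nodes
        simp only [if_neg hgt]
        apply ih
        · rw [hBitems, List.map_map, hrel]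
          apply List.map_congr_left
          intro p hp
          by_cases hpk : p.1 = c.1
          · have hpv : p.2 = old := by
              have h1 := PySem.Dict.get?_of_mem_items groups (show (p.1, p.2) ∈ groups.items by simpa using hp) hnodup
              rw [hpk, hq] at h1
              exact (Option.some.inj h1).symm
            simp [Function.comp, hpk, hpv, hmapp, show ¬ c.2 < (msnd old).2 from hgt]
          · simp [Function.comp, hpk]
        · intro p hp
          rw [hBitems] at hp
          rcases List.mem_map.mp hp with ⟨q, hq', hqe⟩
          by_cases hqk : q.1 = c.1
          · rw [← hqe]; simp [hqk]
          · rw [← hqe]; simpa [hqk] using hne q hq'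
        · exact PySem.Dict.nodup_keys_insert _ _ _ hnodup

-- ===== VERDICT (by name: the statement is the Claim_ definition above) =====
theorem clear_front_spec : Claim_equal_clear_front := by
  intro front _
  unfold Spec_clear_front clear_front clear_front_alt
  have h := loop_rel front PySem.Dict.empty PySem.Dict.empty (by rfl) (by simp [PySem.Dict.empty]) (by simp [PySem.Dict.keys, PySem.Dict.empty])
  simp only [PySem.Dict.values, h, List.map_map]
  rfl
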